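-- pv_equiv track=rewrite | github.com/wmhorsey/RustyPi | pi-unitary/scripts/render_choke_report.py | render_chart
-- ===== SOURCE A (Python) =====
-- PHASES = ["free", "formation", "liftoff", "coherence", "drift", "dissolution"]
--
-- PHASE_COLORS = {
--     "free": "#4c78a8",
--     "formation": "#f58518",
--     "liftoff": "#e45756",
--     "coherence": "#72b7b2",
--     "drift": "#54a24b",
--     "dissolution": "#b279a2",
-- }
--
-- def build_series(by_tick: dict[int, dict[str, int]], max_tick: int, phase: str) -> list[int]:
--     out: list[int] = []
--     tick = 0
--     while tick <= max_tick:
--         out.append(by_tick.get(tick, {}).get(phase, 0))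
--         tick += 1
--     return out
--
-- def polyline_points(series: list[int], width: int, height: int) -> str:
--     if not series:
--         return ""
--     max_v = max(series)
--     if max_v <= 0:
--         max_v = 1
--
--     points: list[str] = []
--     n = len(series)
--     for i, v in enumerate(series):
--         x = int(i * (width - 1) / max(1, n - 1))
--         y = int((height - 1) - (v * (height - 1) / max_v))
--         points.append(f"{x},{y}")
--     return " ".join(points)
--
-- def render_chart(label: str, by_tick: dict[int, dict[str, int]], max_tick: int) -> str:
--     width = 980
--     height = 180
--
--     lines: list[str] = []
--     for p in PHASES:
--         series = build_series(by_tick, max_tick, p)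
--         points = polyline_points(series, width, height)
--         color = PHASE_COLORS[p]
--         lines.append(
--             f'<polyline points="{points}" fill="none" stroke="{color}" stroke-width="2" />'
--         )
--
--     legend = "".join(
--         f'<span class="legend-item"><span class="swatch" style="background:{PHASE_COLORS[p]}"></span>{p}</span>'
--         for p in PHASES
--     )
--
--     return (
--         f"<section class='panel'><h3>{label}</h3>"
--         f"<div class='legend'>{legend}</div>"
--         f"<svg viewBox='0 0 {width} {height}' width='{width}' height='{height}'>{''.join(lines)}</svg>"
--         "</section>"
--     )
-- ===== SOURCE B (Python) =====
-- PHASES = ["free", "formation", "liftoff", "coherence", "drift", "dissolution"]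
--
-- PHASE_COLORS = {
--     "free": "#4c78a8",
--     "formation": "#f58518",
--     "liftoff": "#e45756",
--     "coherence": "#72b7b2",
--     "drift": "#54a24b",
--     "dissolution": "#b279a2",
-- }
--
-- def render_chart(label: str, by_tick: dict[int, dict[str, int]], max_tick: int) -> str:
--     width = 980
--     height = 180
--     n = max_tick + 1
--     denom = max(1, n - 1)
--
--     # pass 1: each phase's vertical scale comes from the dict's OWN entries
--     # (a missing tick contributes 0 < 1, so only stored rows can raise the scale)
--     scales = [1 for _ in PHASES]
--     for tick, row in by_tick.items():
--         if 0 <= tick <= max_tick: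
--             scales = [max(s, row.get(p, 0)) for p, s in zip(PHASES, scales)]
--
--     # pass 2: one sweep over the ticks emits every phase's point string;
--     # the x coordinate is shared by all phases and computed once per tick
--     pts = [[] for _ in PHASES]
--     for i in range(n):
--         x = f"{i * (width - 1) // denom}"
--         row = by_tick.get(i, {})
--         for (p, s), out in zip(zip(PHASES, scales), pts):
--             out.append(f"{x},{(height - 1) + (-(row.get(p, 0) * (height - 1))) // s}")
--
--     lines = [
--         f'<polyline points="{" ".join(out)}" fill="none" stroke="{PHASE_COLORS[p]}" stroke-width="2" />'
--         for p, out in zip(PHASES, pts)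
--     ]
--     legend = "".join(
--         f'<span class="legend-item"><span class="swatch" style="background:{PHASE_COLORS[p]}"></span>{p}</span>'
--         for p in PHASES
--     )
--     return (
--         f"<section class='panel'><h3>{label}</h3>"
--         f"<div class='legend'>{legend}</div>"
--         f"<svg viewBox='0 0 {width} {height}' width='{width}' height='{height}'>{''.join(lines)}</svg>"
--         "</section>"
--     )
-- ===== Notes on version B (the rewrite author's own statement) =====
-- stated objective: alternative
-- what changed: B never builds the per-phase integer series A's build_series produces: each phase's vertical scale is computed by scanning the by_tick dict's own entries (missing ticks can only contribute 0 < 1, so they cannot affect the scale), and then a single sweep over ticks 0..max_tick emits the point strings of all six polylines at once with the x coordinate computed once per tick; the float arithmetic passed through int() becomes direct integer floor division (exact on the domain). …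
import Mathlib
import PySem

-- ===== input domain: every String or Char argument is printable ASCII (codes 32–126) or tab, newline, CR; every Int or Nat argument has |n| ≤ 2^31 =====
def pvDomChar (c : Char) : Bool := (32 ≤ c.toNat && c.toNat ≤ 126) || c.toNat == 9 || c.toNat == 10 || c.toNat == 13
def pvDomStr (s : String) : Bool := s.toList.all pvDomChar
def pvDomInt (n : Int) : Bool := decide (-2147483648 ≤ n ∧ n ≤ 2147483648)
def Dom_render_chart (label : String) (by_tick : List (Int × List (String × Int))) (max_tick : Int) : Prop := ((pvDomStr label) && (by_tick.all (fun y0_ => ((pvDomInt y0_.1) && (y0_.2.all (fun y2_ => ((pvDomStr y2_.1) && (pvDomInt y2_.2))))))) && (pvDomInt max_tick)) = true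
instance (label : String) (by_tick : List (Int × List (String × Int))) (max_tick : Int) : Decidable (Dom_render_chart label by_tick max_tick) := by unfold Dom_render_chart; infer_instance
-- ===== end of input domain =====

-- B computes each phase's vertical scale from the by_tick dict's OWN entries (no per-tick series is
-- ever built) and emits all six polylines' point strings in one sweep over the ticks; the float
-- arithmetic passed through int() becomes direct integer floor division (exact on the domain).

-- ===== PORT A =====
def pvPHASES : List String := ["free", "formation", "liftoff", "coherence", "drift", "dissolution"]

def pvPHASE_COLORS : PySem.Dict String String := PySem.Dict.mk
  [("free", "#4c78a8"), ("formation", "#f58518"), ("liftoff", "#e45756"),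
   ("coherence", "#72b7b2"), ("drift", "#54a24b"), ("dissolution", "#b279a2")]

-- the while loop of build_series; fuel = number of remaining iterations
def build_series_loop (by_tick : List (Int × List (String × Int))) (max_tick : Int) (phase : String) :
    Int → List Int → Nat → List Int
  | _, out, 0 => out
  | tick, out, fuel + 1 =>
      if tick ≤ max_tick then
        build_series_loop by_tick max_tick phase (tick + 1)
          (out ++ [PySem.Dict.getD (PySem.Dict.mk ((PySem.Dict.mk by_tick).getD tick [])) phase 0]) fuel
      else out

def build_series (by_tick : List (Int × List (String × Int))) (max_tick : Int) (phase : String) : List Int :=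
  build_series_loop by_tick max_tick phase 0 [] (max_tick + 1).toNat

def polyline_points (series : List Int) (width : Int) (height : Int) : String :=
  if series = [] then "" else
  let max_v0 := (PySem.List.max? series (fun y => y)).getD 0   -- series ≠ [], so max? is some
  let max_v := if max_v0 ≤ 0 then 1 else max_v0
  let n : Int := PySem.List.len series
  -- Python: x = int(i*(width-1)/max(1,n-1)); y = int((height-1) - v*(height-1)/max_v).  On the domain
  -- (|ints| ≤ 2^31) the float quotients never round across an integer and both values are ≥ 0, so
  -- int() is exactly the floor: ported as floor division.
  let points := (PySem.List.enumerate series 0).map (fun iv =>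
    PySem.Int.toStr (PySem.Int.floordiv (iv.1 * (width - 1)) (max 1 (n - 1))) ++ "," ++
    PySem.Int.toStr ((height - 1) + PySem.Int.floordiv (-(iv.2 * (height - 1))) max_v))
  PySem.Str.join " " points

def render_chart (label : String) (by_tick : List (Int × List (String × Int))) (max_tick : Int) : String :=
  let width : Int := 980
  let height : Int := 180
  let lines := pvPHASES.foldl (fun acc p =>
    let series := build_series by_tick max_tick p
    let points := polyline_points series width height
    let color := (pvPHASE_COLORS.get? p).getD ""   -- PHASE_COLORS[p]; every p ∈ PHASES is a key, KeyError unreachable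
    acc ++ ["<polyline points=\"" ++ points ++ "\" fill=\"none\" stroke=\"" ++ color ++ "\" stroke-width=\"2\" />"]) []
  let legend := PySem.Str.join "" (pvPHASES.map (fun p =>
    "<span class=\"legend-item\"><span class=\"swatch\" style=\"background:" ++
      ((pvPHASE_COLORS.get? p).getD "") ++ "\"></span>" ++ p ++ "</span>"))
  "<section class='panel'><h3>" ++ label ++ "</h3>" ++
  "<div class='legend'>" ++ legend ++ "</div>" ++
  "<svg viewBox='0 0 " ++ PySem.Int.toStr width ++ " " ++ PySem.Int.toStr height ++ "' width='" ++
    PySem.Int.toStr width ++ "' height='" ++ PySem.Int.toStr height ++ "'>" ++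
    PySem.Str.join "" lines ++ "</svg>" ++ "</section>"

-- ===== PORT B =====
def render_chart_alt (label : String) (by_tick : List (Int × List (String × Int))) (max_tick : Int) : String :=
  let width : Int := 980
  let height : Int := 180
  let n := max_tick + 1
  let denom := max 1 (n - 1)
  -- pass 1: each phase's vertical scale from the dict's own entries; Source B's
  -- 'for tick, row in by_tick.items()' iterates the dict's pairs: exact here since Pre_ gives unique keys
  let scales := by_tick.foldl (fun scales kr =>
      if 0 ≤ kr.1 ∧ kr.1 ≤ max_tick then
        (pvPHASES.zip scales).map (fun ps => max ps.2 (PySem.Dict.getD (PySem.Dict.mk kr.2) ps.1 0))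
      else scales)
    (pvPHASES.map (fun _ => (1 : Int)))
  -- pass 2: one sweep over the ticks, emitting every phase's point string; x is shared per tick
  -- (Source B's in-place 'out.append(…)' on each phase's list is modeled functionally as '++ […]')
  let pts := (PySem.List.pyRange 0 n 1).foldl (fun pts i =>
      let x := PySem.Int.toStr (PySem.Int.floordiv (i * (width - 1)) denom)
      let row := (PySem.Dict.mk by_tick).getD i []
      ((pvPHASES.zip scales).zip pts).map (fun q =>
        q.2 ++ [x ++ "," ++ PySem.Int.toStr ((height - 1) +
          PySem.Int.floordiv (-(PySem.Dict.getD (PySem.Dict.mk row) q.1.1 0 * (height - 1))) q.1.2)]))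
    (pvPHASES.map (fun _ => ([] : List String)))
  let lines := (pvPHASES.zip pts).map (fun pp =>
    "<polyline points=\"" ++ PySem.Str.join " " pp.2 ++ "\" fill=\"none\" stroke=\"" ++
      ((pvPHASE_COLORS.get? pp.1).getD "") ++ "\" stroke-width=\"2\" />")
  let legend := PySem.Str.join "" (pvPHASES.map (fun p =>
    "<span class=\"legend-item\"><span class=\"swatch\" style=\"background:" ++
      ((pvPHASE_COLORS.get? p).getD "") ++ "\"></span>" ++ p ++ "</span>"))
  "<section class='panel'><h3>" ++ label ++ "</h3>" ++
  "<div class='legend'>" ++ legend ++ "</div>" ++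
  "<svg viewBox='0 0 " ++ PySem.Int.toStr width ++ " " ++ PySem.Int.toStr height ++ "' width='" ++
    PySem.Int.toStr width ++ "' height='" ++ PySem.Int.toStr height ++ "'>" ++
    PySem.Str.join "" lines ++ "</svg>" ++ "</section>"

-- ===== PRECONDITION & SPEC =====
-- Pre_ excludes only association lists with a duplicate tick key: A's by_tick parameter is a Python
-- dict, whose keys are unique, so such lists represent no Python input and first-vs-last-match
-- lookup on them is an accident of the list encoding.
def Pre_render_chart (label : String) (by_tick : List (Int × List (String × Int))) (max_tick : Int) : Prop :=
  (by_tick.map Prod.fst).Nodup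
instance (label : String) (by_tick : List (Int × List (String × Int))) (max_tick : Int) : Decidable (Pre_render_chart label by_tick max_tick) := by unfold Pre_render_chart; infer_instance

def pvWitness_render_chart : String × (List (Int × List (String × Int))) × Int :=
  ("ticks", [(0, [("free", 2)]), (1, [("drift", 1), ("free", 1)])], 1)

def Spec_render_chart (label : String) (by_tick : List (Int × List (String × Int))) (max_tick : Int) (out : String) : Prop := out = render_chart_alt label by_tick max_tick
instance (label : String) (by_tick : List (Int × List (String × Int))) (max_tick : Int) (out : String) : Decidable (Spec_render_chart label by_tick max_tick out) := by unfold Spec_render_chart; infer_instance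

-- ===== CLAIM (what is proved, stated in full; the proofs are below) =====
def Claim_equal_render_chart : Prop := ∀ (label : String) (by_tick : List (Int × List (String × Int))) (max_tick : Int), Dom_render_chart label by_tick max_tick → Pre_render_chart label by_tick max_tick → Spec_render_chart label by_tick max_tick (render_chart label by_tick max_tick)

-- ===== LEMMAS AND PROOFS =====

-- the per-tick, per-phase value both programs read
def pvCell (by_tick : List (Int × List (String × Int))) (phase : String) (tick : Int) : Int :=
  PySem.Dict.getD (PySem.Dict.mk ((PySem.Dict.mk by_tick).getD tick [])) phase 0

-- the scale B's first pass computes for phase p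
def pvScale (by_tick : List (Int × List (String × Int))) (max_tick : Int) (p : String) : Int :=
  by_tick.foldl (fun s kr =>
    if 0 ≤ kr.1 ∧ kr.1 ≤ max_tick then max s (PySem.Dict.getD (PySem.Dict.mk kr.2) p 0) else s) 1

theorem build_series_loop_eq (by_tick : List (Int × List (String × Int))) (max_tick : Int) (phase : String) :
    ∀ (fuel : Nat) (tick : Int) (out : List Int), (max_tick + 1 - tick).toNat ≤ fuel →
    build_series_loop by_tick max_tick phase tick out fuel
      = out ++ (PySem.List.pyRange tick (max_tick + 1) 1).map (pvCell by_tick phase) := by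
  intro fuel
  induction fuel with
  | zero =>
    intro tick out h
    rw [PySem.List.pyRange_one_eq_nil (by omega)]
    simp [build_series_loop]
  | succ fuel ih =>
    intro tick out h
    by_cases hle : tick ≤ max_tick
    · rw [PySem.List.pyRange_one_cons (by omega)]
      simp only [build_series_loop, if_pos hle]
      rw [ih (tick + 1) _ (by omega)]
      simp [pvCell]
    · rw [PySem.List.pyRange_one_eq_nil (by omega)]
      simp [build_series_loop, if_neg hle]

theorem build_series_eq (by_tick : List (Int × List (String × Int))) (max_tick : Int) (phase : String) :
    build_series by_tick max_tick phase
      = (PySem.List.pyRange 0 (max_tick + 1) 1).map (pvCell by_tick phase) := by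
  rw [build_series, build_series_loop_eq by_tick max_tick phase _ 0 [] (by omega)]
  simp

theorem zip_self_map {α β : Type} (l : List α) (f : α → β) :
    l.zip (l.map f) = l.map (fun a => (a, f a)) := by
  simpa using (List.zip_map' (f := id) (g := f) (l := l))

-- the two staged folds of B, per phase: a conditional zip-map fold over any list …
theorem fold_zip_ite {α β γ : Type} (l : List α) (C : γ → Prop) [DecidablePred C] (g : α → β → γ → β) :
    ∀ (ts : List γ) (f : α → β),
    ts.foldl (fun acc t => if C t then (l.zip acc).map (fun pv => g pv.1 pv.2 t) else acc) (l.map f)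
      = l.map (fun p => ts.foldl (fun s t => if C t then g p s t else s) (f p)) := by
  intro ts
  induction ts with
  | nil => intro f; simp
  | cons t ts ih =>
    intro f
    by_cases h : C t
    · simp only [List.foldl_cons, if_pos h, zip_self_map, List.map_map, Function.comp_def]
      exact ih (fun p => g p (f p) t)
    · simp only [List.foldl_cons, if_neg h]
      exact ih f

-- … and the unconditional one
theorem fold_zip {α β γ : Type} (l : List α) (g : α → β → γ → β) :
    ∀ (ts : List γ) (f : α → β),
    ts.foldl (fun acc t => (l.zip acc).map (fun pv => g pv.1 pv.2 t)) (l.map f)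
      = l.map (fun p => ts.foldl (fun s t => g p s t) (f p)) := by
  intro ts
  induction ts with
  | nil => intro f; simp
  | cons t ts ih =>
    intro f
    simp only [List.foldl_cons, zip_self_map, List.map_map, Function.comp_def]
    exact ih (fun p => g p (f p) t)

theorem pvCell_nil (p : String) (t : Int) : pvCell [] p t = 0 := rfl

theorem mk_getD_cons (k : Int) (row : List (String × Int)) (rest : List (Int × List (String × Int))) (t : Int) :
    (PySem.Dict.mk ((k, row) :: rest)).getD t []
      = if k = t then row else (PySem.Dict.mk rest).getD t [] := by
  rw [PySem.Dict.getD_eq_get?_getD, PySem.Dict.get?_mk_cons, PySem.Dict.getD_eq_get?_getD]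
  by_cases h : k = t <;> simp [h]

theorem pvCell_cons (k : Int) (row : List (String × Int)) (rest : List (Int × List (String × Int)))
    (p : String) (t : Int) :
    pvCell ((k, row) :: rest) p t
      = if k = t then PySem.Dict.getD (PySem.Dict.mk row) p 0 else pvCell rest p t := by
  unfold pvCell
  rw [mk_getD_cons]
  by_cases h : k = t <;> simp [h]

theorem pvCell_not_mem (rest : List (Int × List (String × Int))) (p : String) (t : Int)
    (h : t ∉ rest.map Prod.fst) : pvCell rest p t = 0 := by
  have hk : (PySem.Dict.mk rest).get? t = none := by
    rw [PySem.Dict.get?_eq_none_iff_not_mem_keys]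
    simpa [PySem.Dict.keys] using h
  have h2 : (PySem.Dict.mk rest).getD t [] = [] := by
    rw [PySem.Dict.getD_eq_get?_getD, hk]
    rfl
  unfold pvCell
  rw [h2]
  rfl

theorem foldl_max_const_zero (l : List Int) : ∀ (a : Int), 0 ≤ a →
    l.foldl (fun s _ => max s 0) a = a := by
  induction l with
  | nil => intro a _; rfl
  | cons x l ih =>
    intro a ha
    simp only [List.foldl_cons, max_eq_left ha]
    exact ih a ha

theorem foldl_max_middle (f : Int → Int) (l1 l2 : List Int) (a x : Int) :
    (l1 ++ x :: l2).foldl (fun s t => max s (f t)) a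
      = (l1 ++ l2).foldl (fun s t => max s (f t)) (max a (f x)) := by
  haveI : RightCommutative (fun (s : Int) t => max s (f t)) :=
    ⟨fun b a1 a2 => max_right_comm b (f a1) (f a2)⟩
  rw [(List.perm_middle (a := x) (l₁ := l1) (l₂ := l2)).foldl_eq a]
  rfl

-- B's first pass computes exactly the running max A takes over the whole series
theorem scale_fold_eq (p : String) (max_tick : Int) :
    ∀ (bt : List (Int × List (String × Int))) (a : Int), 0 ≤ a → (bt.map Prod.fst).Nodup →
    (PySem.List.pyRange 0 (max_tick + 1) 1).foldl (fun s t => max s (pvCell bt p t)) a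
      = bt.foldl (fun s kr =>
          if 0 ≤ kr.1 ∧ kr.1 ≤ max_tick then max s (PySem.Dict.getD (PySem.Dict.mk kr.2) p 0) else s) a := by
  intro bt
  induction bt with
  | nil =>
    intro a ha _
    simp only [pvCell_nil, List.foldl_nil]
    exact foldl_max_const_zero _ a ha
  | cons kr rest ih =>
    intro a ha hnd
    obtain ⟨k, row⟩ := kr
    simp only [List.map_cons, List.nodup_cons] at hnd
    obtain ⟨hkmem, hndrest⟩ := hnd
    simp only [pvCell_cons, List.foldl_cons]
    by_cases hin : 0 ≤ k ∧ k ≤ max_tick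
    · rw [if_pos hin]
      have hsplit : PySem.List.pyRange 0 (max_tick + 1) 1
          = PySem.List.pyRange 0 k 1 ++ k :: PySem.List.pyRange (k + 1) (max_tick + 1) 1 := by
        rw [PySem.List.pyRange_one_append 0 k (max_tick + 1) hin.1 (by omega),
          PySem.List.pyRange_one_cons (a := k) (b := max_tick + 1) (by omega)]
      have hnotk : ∀ t, t ∈ PySem.List.pyRange 0 k 1 ++ PySem.List.pyRange (k + 1) (max_tick + 1) 1 → k ≠ t := by
        intro t ht
        rcases List.mem_append.1 ht with h' | h' <;>
          · have := PySem.List.mem_pyRange_one.1 h'; omega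
      rw [hsplit, foldl_max_middle, if_pos rfl]
      rw [PySem.List.foldl_congr_mem _ _ (fun s t => max s (pvCell rest p t)) _
        (fun acc x hx => by rw [if_neg (hnotk x hx)])]
      rw [← ih (max a (PySem.Dict.getD (PySem.Dict.mk row) p 0)) (by positivity) hndrest,
        hsplit, foldl_max_middle, pvCell_not_mem rest p k hkmem,
        max_eq_left (le_trans ha (le_max_left a _))]
    · rw [if_neg hin]
      have hnotk : ∀ t ∈ PySem.List.pyRange 0 (max_tick + 1) 1, k ≠ t := by
        intro t ht
        have := PySem.List.mem_pyRange_one.1 ht; omega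
      rw [PySem.List.foldl_congr_mem _ _ (fun s t => max s (pvCell rest p t)) _
        (fun acc x hx => by rw [if_neg (hnotk x hx)])]
      exact ih a ha hndrest

-- max folded through a running max (used to push A's 'max 1 (max of series)' into one fold)
theorem foldl_max_max (l : List Int) : ∀ (b c : Int),
    l.foldl max (max c b) = max c (l.foldl max b) := by
  induction l with
  | nil => intro b c; rfl
  | cons x l ih =>
    intro b c
    simp only [List.foldl_cons, max_assoc]
    exact ih (max b x) c

-- A's clamped series maximum IS B's scale
theorem maxD_eq_scale (by_tick : List (Int × List (String × Int))) (max_tick : Int) (p : String)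
    (hnd : (by_tick.map Prod.fst).Nodup) (hn : 0 < max_tick + 1) :
    (if ((PySem.List.max? ((PySem.List.pyRange 0 (max_tick + 1) 1).map (pvCell by_tick p)) (fun y => y)).getD 0) ≤ 0
      then (1 : Int)
      else (PySem.List.max? ((PySem.List.pyRange 0 (max_tick + 1) 1).map (pvCell by_tick p)) (fun y => y)).getD 0)
      = pvScale by_tick max_tick p := by
  have hS := PySem.List.pyRange_one_cons (a := 0) (b := max_tick + 1) (by omega)
  rw [hS, List.map_cons, PySem.List.max?_id_cons, Option.getD_some]
  have h1 : ∀ (m : Int), (if m ≤ 0 then (1 : Int) else m) = max 1 m := by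
    intro m; split_ifs with h <;> omega
  rw [h1, ← foldl_max_max, ← List.foldl_cons, ← List.map_cons, ← hS, List.foldl_map, pvScale]
  exact scale_fold_eq p max_tick by_tick 1 (by omega) hnd

-- enumerating A's series pairs each tick with its value (ticks 0..n-1 are their own indices)
theorem enumerate_map_range (n : Int) (hn : 0 < n) (f : Int → Int) :
    PySem.List.enumerate ((PySem.List.pyRange 0 n 1).map f) 0
      = (PySem.List.pyRange 0 n 1).map (fun t => (t, f t)) := by
  rw [PySem.List.enumerate_eq_map_pyRange _ 0]
  have hlen : PySem.List.len ((PySem.List.pyRange 0 n 1).map f) = n := by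
    simp [PySem.List.len_eq, PySem.List.length_pyRange_one]; omega
  rw [hlen]
  refine List.map_congr_left (fun t ht => ?_)
  have hb := PySem.List.mem_pyRange_one.1 ht
  have hget : PySem.List.pyGetD ((PySem.List.pyRange 0 n 1).map f) t 0 = f t := by
    have hcast : ((n.toNat : Nat) : Int) = n := by omega
    have htcast : ((t.toNat : Nat) : Int) = t := by omega
    rw [← hcast, ← htcast]
    exact PySem.List.pyGetD_map_pyRange f n.toNat t.toNat 0 (by omega)
  rw [hget]

-- the per-phase polyline strings of A and B agree
theorem phase_line_eq (by_tick : List (Int × List (String × Int))) (max_tick : Int)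
    (hnd : (by_tick.map Prod.fst).Nodup) (p : String) :
    polyline_points ((PySem.List.pyRange 0 (max_tick + 1) 1).map (pvCell by_tick p)) 980 180
      = PySem.Str.join " " ((PySem.List.pyRange 0 (max_tick + 1) 1).map (fun t =>
          PySem.Int.toStr (PySem.Int.floordiv (t * (980 - 1)) (max 1 (max_tick + 1 - 1))) ++ "," ++
          PySem.Int.toStr ((180 - 1) + PySem.Int.floordiv
            (-(PySem.Dict.getD (PySem.Dict.mk ((PySem.Dict.mk by_tick).getD t [])) p 0 * (180 - 1)))
            (pvScale by_tick max_tick p)))) := by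
  by_cases hn : max_tick + 1 ≤ 0
  · rw [PySem.List.pyRange_one_eq_nil hn]
    rfl
  · push_neg at hn
    have hne : (PySem.List.pyRange 0 (max_tick + 1) 1).map (pvCell by_tick p) ≠ [] := by
      rw [PySem.List.pyRange_one_cons (a := 0) (b := max_tick + 1) (by omega)]; simp
    have hlen : PySem.List.len ((PySem.List.pyRange 0 (max_tick + 1) 1).map (pvCell by_tick p)) = max_tick + 1 := by
      simp [PySem.List.len_eq, PySem.List.length_pyRange_one]; omega
    rw [polyline_points, if_neg hne]
    simp only [hlen]
    rw [maxD_eq_scale by_tick max_tick p hnd hn,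
      enumerate_map_range (max_tick + 1) hn (pvCell by_tick p), List.map_map]
    rfl

-- B's scales list, phase by phase
theorem scales_eq (by_tick : List (Int × List (String × Int))) (max_tick : Int) :
    by_tick.foldl (fun scales kr =>
        if 0 ≤ kr.1 ∧ kr.1 ≤ max_tick then
          (pvPHASES.zip scales).map (fun ps => max ps.2 (PySem.Dict.getD (PySem.Dict.mk kr.2) ps.1 0))
        else scales)
      (pvPHASES.map (fun _ => (1 : Int)))
      = pvPHASES.map (pvScale by_tick max_tick) :=
  fold_zip_ite pvPHASES (fun kr => 0 ≤ kr.1 ∧ kr.1 ≤ max_tick)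
    (fun p s kr => max s (PySem.Dict.getD (PySem.Dict.mk kr.2) p 0)) by_tick (fun _ => 1)

-- B's single sweep, phase by phase
theorem pts_eq (by_tick : List (Int × List (String × Int))) (max_tick : Int) :
    (PySem.List.pyRange 0 (max_tick + 1) 1).foldl (fun pts i =>
        ((pvPHASES.map (fun p => (p, pvScale by_tick max_tick p))).zip pts).map (fun q =>
          q.2 ++ [PySem.Int.toStr (PySem.Int.floordiv (i * (980 - 1)) (max 1 (max_tick + 1 - 1))) ++ "," ++
            PySem.Int.toStr ((180 - 1) + PySem.Int.floordiv
              (-(PySem.Dict.getD (PySem.Dict.mk ((PySem.Dict.mk by_tick).getD i [])) q.1.1 0 * (180 - 1))) q.1.2)]))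
      (pvPHASES.map (fun _ => ([] : List String)))
      = pvPHASES.map (fun p => (PySem.List.pyRange 0 (max_tick + 1) 1).map (fun i =>
          PySem.Int.toStr (PySem.Int.floordiv (i * (980 - 1)) (max 1 (max_tick + 1 - 1))) ++ "," ++
          PySem.Int.toStr ((180 - 1) + PySem.Int.floordiv
            (-(PySem.Dict.getD (PySem.Dict.mk ((PySem.Dict.mk by_tick).getD i [])) p 0 * (180 - 1)))
            (pvScale by_tick max_tick p)))) := by
  have h0 : pvPHASES.map (fun _ => ([] : List String))
      = (pvPHASES.map (fun p => (p, pvScale by_tick max_tick p))).map (fun _ => ([] : List String)) := by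
    rw [List.map_map]; rfl
  rw [h0]
  refine (fold_zip (pvPHASES.map (fun p => (p, pvScale by_tick max_tick p)))
    (fun (q : String × Int) (out : List String) (i : Int) =>
      out ++ [PySem.Int.toStr (PySem.Int.floordiv (i * (980 - 1)) (max 1 (max_tick + 1 - 1))) ++ "," ++
        PySem.Int.toStr ((180 - 1) + PySem.Int.floordiv
          (-(PySem.Dict.getD (PySem.Dict.mk ((PySem.Dict.mk by_tick).getD i [])) q.1 0 * (180 - 1))) q.2)])
    (PySem.List.pyRange 0 (max_tick + 1) 1) (fun _ => ([] : List String))).trans ?_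
  simp only [PySem.List.foldl_append_singleton_eq_map, List.nil_append, List.map_map, Function.comp_def]

theorem render_chart_eq (label : String) (by_tick : List (Int × List (String × Int))) (max_tick : Int)
    (hnd : (by_tick.map Prod.fst).Nodup) :
    render_chart label by_tick max_tick = render_chart_alt label by_tick max_tick := by
  simp only [render_chart, render_chart_alt, PySem.List.foldl_append_singleton_eq_map,
    List.nil_append, build_series_eq, scales_eq, zip_self_map, List.map_map, Function.comp_def,
    pts_eq, phase_line_eq by_tick max_tick hnd]

-- ===== VERDICT (by name: the statement is the Claim_ definition above) =====
theorem render_chart_spec : Claim_equal_render_chart := by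
  intro label by_tick max_tick _ hpre
  exact render_chart_eq label by_tick max_tick hpre
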